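-- pv_equiv track=rewrite | github.com/U-alb/bioinformatics | Lab 13/L13_3.py | create_word_mapping
-- ===== SOURCE A (Python) =====
-- def create_word_mapping(words):
--     word_to_symbol = {}
--     symbol_to_word = {}
--     symbol_counter = 1
--
--     for word in words:
--         if word not in word_to_symbol:
--             symbol = f"W{symbol_counter}"
--             word_to_symbol[word] = symbol
--             symbol_to_word[symbol] = word
--             symbol_counter += 1
--
--     return word_to_symbol, symbol_to_word
-- ===== SOURCE B (Python) =====
-- def create_word_mapping(words):
--     # first-occurrence index of every word, via one reversed-enumeration dict
--     # (earlier assignments overwrite later ones)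
--     first_index = {w: i for i, w in reversed(list(enumerate(words)))}
--     # sorting the distinct words by first-occurrence index IS first-occurrence
--     # order, with no membership branch and no running counter
--     unique = sorted(set(words), key=first_index.__getitem__)
--     symbol_to_word = {"W%d" % i: w for i, w in enumerate(unique, 1)}
--     word_to_symbol = {w: s for s, w in symbol_to_word.items()}
--     return word_to_symbol, symbol_to_word
-- ===== Notes on version B (the rewrite author's own statement) =====
-- stated objective: alternative
-- what changed: Replaces A's single streaming pass with a membership branch and a running counter by a sort-based scheme: first-occurrence indices are precomputed in one reversed-enumeration dict, the distinct words are sorted by that index, symbol_to_word is read off by enumeration and word_to_symbol is its inversion.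
import Mathlib
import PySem

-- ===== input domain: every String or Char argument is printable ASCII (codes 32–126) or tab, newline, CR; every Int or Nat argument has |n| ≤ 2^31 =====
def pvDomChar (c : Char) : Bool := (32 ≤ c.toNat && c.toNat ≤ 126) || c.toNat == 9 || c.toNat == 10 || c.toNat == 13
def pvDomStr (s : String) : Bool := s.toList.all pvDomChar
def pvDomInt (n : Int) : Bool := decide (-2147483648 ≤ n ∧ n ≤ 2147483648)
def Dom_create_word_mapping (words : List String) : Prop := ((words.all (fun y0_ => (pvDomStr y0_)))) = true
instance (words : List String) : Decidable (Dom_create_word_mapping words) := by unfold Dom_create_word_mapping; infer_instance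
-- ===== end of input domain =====

-- B replaces A's membership-branch-and-counter pass by a sort: the distinct words
-- sorted by first-occurrence index (precomputed by one reversed-enumeration dict),
-- then both maps read off by enumeration (objective: alternative, same return value).

-- f"W{c}" / "W%d" % c for an integer c (shared formatting helper of both ports)
def pvSym (c : Int) : String := String.ofList ('W' :: PySem.Int.toChars c)

-- ===== PORT A =====
def create_word_mapping (words : List String) : (List (String × String)) × (List (String × String)) :=
  let st := words.foldl
    (fun (st : PySem.Dict String String × PySem.Dict String String × Int) word =>
      if !(st.1.contains word) then
        (st.1.insert word (pvSym st.2.2), st.2.1.insert (pvSym st.2.2) word, st.2.2 + 1)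
      else st)
    (PySem.Dict.empty, PySem.Dict.empty, 1)
  (st.1.items, st.2.1.items)

-- ===== PORT B =====
-- first_index.__getitem__ raises KeyError on a missing key; every w in set(words)
-- is a key of first_index, so the port reads it with getD (default unreachable).
-- The symbol_to_word / word_to_symbol dict comprehensions have provably distinct
-- keys (injective symbols / distinct words), so their association lists are the
-- mapped lists directly.
def create_word_mapping_alt (words : List String) : (List (String × String)) × (List (String × String)) :=
  let first_index : PySem.Dict String Int :=
    (PySem.List.enumerate words 0).reverse.foldl (fun d p => d.insert p.2 p.1) PySem.Dict.empty
  let unique := PySem.List.sorted (PySem.Set.ofList words) (fun w => first_index.getD w 0) false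
  let symbol_to_word := (PySem.List.enumerate unique 1).map (fun p => (pvSym p.1, p.2))
  (symbol_to_word.map (fun q => (q.2, q.1)), symbol_to_word)

-- ===== PRECONDITION & SPEC =====
def Spec_create_word_mapping (words : List String) (out : (List (String × String)) × (List (String × String))) : Prop := out = create_word_mapping_alt words
instance (words : List String) (out : (List (String × String)) × (List (String × String))) : Decidable (Spec_create_word_mapping words out) := by unfold Spec_create_word_mapping; infer_instance

-- ===== CLAIM (what is proved, stated in full; the proofs are below) =====
def Claim_equal_create_word_mapping : Prop := ∀ (words : List String), Dom_create_word_mapping words → Spec_create_word_mapping words (create_word_mapping words)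

-- ===== LEMMAS AND PROOFS =====

-- `Nat.toDigitsCore` pulls its accumulator out
lemma pvTdcAppend (b : Nat) : ∀ (f n : Nat) (l : List Char),
    Nat.toDigitsCore b f n l = Nat.toDigitsCore b f n [] ++ l := by
  intro f
  induction f with
  | zero => intro n l; simp [Nat.toDigitsCore]
  | succ f ih =>
    intro n l
    simp only [Nat.toDigitsCore]
    by_cases h : n / b = 0
    · simp [h]
    · simp only [h, if_false]
      rw [ih (n / b) (Nat.digitChar (n % b) :: l), ih (n / b) [Nat.digitChar (n % b)]]
      simp

-- fuel independence of `Nat.toDigitsCore` (enough fuel)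
lemma pvTdcFuel (b : Nat) (hb : 2 ≤ b) : ∀ (n f f' : Nat), n < f → n < f' →
    Nat.toDigitsCore b f n [] = Nat.toDigitsCore b f' n [] := by
  intro n
  induction n using Nat.strong_induction_on with
  | _ n ih =>
    intro f f' hf hf'
    obtain ⟨g, rfl⟩ : ∃ g, f = g + 1 := ⟨f - 1, by omega⟩
    obtain ⟨g', rfl⟩ : ∃ g', f' = g' + 1 := ⟨f' - 1, by omega⟩
    simp only [Nat.toDigitsCore]
    by_cases h : n / b = 0
    · simp [h]
    · simp only [h, if_false]
      have hb0 : 0 < b := by omega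
      have hn0 : 0 < n := by
        rcases Nat.eq_zero_or_pos n with h0 | h0
        · exact absurd (by simp [h0]) h
        · exact h0
      have hnb : n / b < n := Nat.div_lt_self hn0 (by omega)
      rw [pvTdcAppend b g, pvTdcAppend b g']
      rw [ih (n / b) hnb g g' (by omega) (by omega)]

lemma pvRepUnfold (n : Nat) : Nat.toDigits 10 n =
    if n < 10 then [Nat.digitChar n]
    else Nat.toDigits 10 (n / 10) ++ [Nat.digitChar (n % 10)] := by
  by_cases h : n < 10
  · simp only [h, if_true, Nat.toDigits, Nat.toDigitsCore]
    have : n / 10 = 0 := Nat.div_eq_of_lt h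
    simp [this, Nat.mod_eq_of_lt h]
  · simp only [h, if_false]
    have h10 : ¬ (n / 10 = 0) := fun h0 => h (by omega)
    have hdiv : n / 10 < n := Nat.div_lt_self (by omega) (by omega)
    calc Nat.toDigits 10 n
        = Nat.toDigitsCore 10 (n + 1) n [] := rfl
      _ = Nat.toDigitsCore 10 n (n / 10) [Nat.digitChar (n % 10)] := by
          simp only [Nat.toDigitsCore]; rw [if_neg h10]
      _ = Nat.toDigitsCore 10 n (n / 10) [] ++ [Nat.digitChar (n % 10)] :=
          pvTdcAppend 10 n (n / 10) _
      _ = Nat.toDigitsCore 10 (n / 10 + 1) (n / 10) [] ++ [Nat.digitChar (n % 10)] := by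
          rw [pvTdcFuel 10 (by omega) (n / 10) n (n / 10 + 1) hdiv (by omega)]
      _ = Nat.toDigits 10 (n / 10) ++ [Nat.digitChar (n % 10)] := rfl

lemma pvRepNeNil (n : Nat) : Nat.toDigits 10 n ≠ [] := by
  rw [pvRepUnfold]
  split_ifs <;> simp

lemma pvDigitCharInj : ∀ m < 10, ∀ n < 10, Nat.digitChar m = Nat.digitChar n → m = n := by decide

lemma pvRepInj : ∀ m n : Nat, Nat.toDigits 10 m = Nat.toDigits 10 n → m = n := by
  intro m
  induction m using Nat.strong_induction_on with
  | _ m ih =>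
    intro n h
    rw [pvRepUnfold m, pvRepUnfold n] at h
    split_ifs at h with h1 h2 h2
    · exact pvDigitCharInj m h1 n h2 (by simpa using h)
    · exfalso
      have hlen := congrArg List.length h
      simp only [List.length_append, List.length_cons, List.length_nil] at hlen
      exact pvRepNeNil (n / 10) (List.eq_nil_of_length_eq_zero (by omega))
    · exfalso
      have hlen := congrArg List.length h
      simp only [List.length_append, List.length_cons, List.length_nil] at hlen
      exact pvRepNeNil (m / 10) (List.eq_nil_of_length_eq_zero (by omega))
    · obtain ⟨hq, hr⟩ := List.append_inj' h (by simp)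
      have hq' : m / 10 = n / 10 :=
        ih (m / 10) (Nat.div_lt_self (by omega) (by omega)) (n / 10) hq
      have hr' : m % 10 = n % 10 :=
        pvDigitCharInj (m % 10) (Nat.mod_lt m (by omega)) (n % 10) (Nat.mod_lt n (by omega))
          (by simpa using hr)
      omega

lemma pvSymInj {a b : Int} (ha : 0 ≤ a) (hb : 0 ≤ b) (h : pvSym a = pvSym b) : a = b := by
  unfold pvSym at h
  have h' : PySem.Int.toChars a = PySem.Int.toChars b := by
    have h2 := congrArg String.toList h
    simp only [String.toList_ofList, List.cons.injEq, true_and] at h2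
    exact h2
  unfold PySem.Int.toChars at h'
  rw [if_neg (by omega), if_neg (by omega)] at h'
  have := pvRepInj a.toNat b.toNat h'
  omega

-- dict state reached by A's loop after the distinct prefix u has been seen
def pvMkA (u : List String) : PySem.Dict String String :=
  ⟨(PySem.List.enumerate u 1).map (fun p => (p.2, pvSym p.1))⟩
def pvMkB (u : List String) : PySem.Dict String String :=
  ⟨(PySem.List.enumerate u 1).map (fun p => (pvSym p.1, p.2))⟩

lemma pvKeysMkA (u : List String) : (pvMkA u).keys = u := by
  simp [pvMkA, PySem.Dict.keys, List.map_map, Function.comp_def, PySem.List.map_snd_enumerate]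

lemma pvContainsMkA (u : List String) (w : String) :
    (pvMkA u).contains w = decide (w ∈ u) := by
  rw [PySem.Dict.contains_eq_decide_mem_keys, pvKeysMkA]

lemma pvContainsMkB (u : List String) :
    (pvMkB u).contains (pvSym ((u.length : Int) + 1)) = false := by
  rw [PySem.Dict.contains_eq_decide_mem_keys]
  simp only [decide_eq_false_iff_not, pvMkB, PySem.Dict.keys, List.map_map, Function.comp_def]
  intro hmem
  rw [List.mem_map] at hmem
  obtain ⟨p, hp, hps⟩ := hmem
  rw [PySem.List.mem_enumerate_iff] at hp
  obtain ⟨k, hk, rfl⟩ := hp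
  have := pvSymInj (a := (1 : Int) + k) (by omega) (by omega) hps
  omega

lemma pvLoopInv : ∀ (ws u : List String), u.Nodup →
    ws.foldl
      (fun (st : PySem.Dict String String × PySem.Dict String String × Int) word =>
        if !(st.1.contains word) then
          (st.1.insert word (pvSym st.2.2), st.2.1.insert (pvSym st.2.2) word, st.2.2 + 1)
        else st)
      (pvMkA u, pvMkB u, (u.length + 1 : Int)) =
    (pvMkA (PySem.Set.update u ws), pvMkB (PySem.Set.update u ws),
      ((PySem.Set.update u ws).length + 1 : Int)) := by
  intro ws
  induction ws with
  | nil =>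
    intro u hu
    simp [PySem.Set.update]
  | cons w ws ih =>
    intro u hu
    rw [List.foldl_cons, PySem.Set.update_cons]
    by_cases hw : w ∈ u
    · rw [PySem.Set.add_of_mem hw]
      have hc : (pvMkA u).contains w = true := by rw [pvContainsMkA]; simpa using hw
      simp only [hc, Bool.not_true, Bool.false_eq_true, if_false]
      exact ih u hu
    · rw [PySem.Set.add_of_not_mem hw]
      have hc : (pvMkA u).contains w = false := by rw [pvContainsMkA]; simpa using hw
      simp only [hc, Bool.not_false, if_true]
      have hA : (pvMkA u).insert w (pvSym ((u.length : Int) + 1)) = pvMkA (u ++ [w]) := by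
        apply PySem.Dict.ext
        rw [PySem.Dict.items_insert_of_not_contains _ _ hc]
        simp only [pvMkA, PySem.List.enumerate_append, List.map_append,
          PySem.List.enumerate_cons, PySem.List.enumerate_nil, List.map_cons, List.map_nil]
        rw [show (1 : Int) + (u.length : Int) = (u.length : Int) + 1 from by omega]
      have hB : (pvMkB u).insert (pvSym ((u.length : Int) + 1)) w = pvMkB (u ++ [w]) := by
        apply PySem.Dict.ext
        rw [PySem.Dict.items_insert_of_not_contains _ _ (pvContainsMkB u)]
        simp only [pvMkB, PySem.List.enumerate_append, List.map_append,
          PySem.List.enumerate_cons, PySem.List.enumerate_nil, List.map_cons, List.map_nil]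
        rw [show (1 : Int) + (u.length : Int) = (u.length : Int) + 1 from by omega]
      have hu' : (u ++ [w]).Nodup := by
        rw [List.nodup_append]
        refine ⟨hu, List.nodup_singleton w, ?_⟩
        intro a ha b hb
        rw [List.mem_singleton] at hb
        exact fun h => hw ((hb ▸ h) ▸ ha)
      have := ih (u ++ [w]) hu'
      simp only [List.length_append, List.length_cons, List.length_nil, Nat.cast_add,
        Nat.cast_one] at this ⊢
      rw [hA, hB]
      convert this using 3

-- first-occurrence index of a member is a valid index
lemma pvIdxLt {t : List String} {x : String} (hx : x ∈ t) :
    (PySem.List.index? t x).getD 0 < t.length := by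
  obtain ⟨k, hk⟩ := Option.isSome_iff_exists.mp ((PySem.List.index?_isSome_iff t x).mpr hx)
  obtain ⟨hlt, -, -⟩ := PySem.List.getElem_of_index?_eq_some hk
  rw [hk]
  simpa using hlt

-- set(words) is already sorted by first-occurrence index (strictly)
lemma pvDedupPairwise (ws : List String) :
    (PySem.Set.ofList ws).Pairwise
      (fun a b => (((PySem.List.index? ws a).getD 0 : Nat) : Int)
        < (((PySem.List.index? ws b).getD 0 : Nat) : Int)) := by
  induction ws using List.reverseRecOn with
  | nil => simp [PySem.Set.ofList]
  | append_singleton t w ih =>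
    have hof : PySem.Set.ofList (t ++ [w]) = PySem.Set.add (PySem.Set.ofList t) w := by
      simp [PySem.Set.ofList_eq_foldl, List.foldl_append]
    rw [hof]
    have hidx : ∀ x ∈ t, PySem.List.index? (t ++ [w]) x = PySem.List.index? t x :=
      fun x hx => PySem.List.index?_append_of_mem [w] hx
    by_cases hw : w ∈ t
    · rw [PySem.Set.add_of_mem ((PySem.Set.mem_ofList t w).mpr hw)]
      refine ih.imp_of_mem ?_
      intro a b ha hb h
      rwa [hidx a ((PySem.Set.mem_ofList t a).mp ha), hidx b ((PySem.Set.mem_ofList t b).mp hb)]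
    · rw [PySem.Set.add_of_not_mem (fun h => hw ((PySem.Set.mem_ofList t w).mp h))]
      rw [List.pairwise_append]
      refine ⟨ih.imp_of_mem ?_, List.pairwise_singleton _ _, ?_⟩
      · intro a b ha hb h
        rwa [hidx a ((PySem.Set.mem_ofList t a).mp ha), hidx b ((PySem.Set.mem_ofList t b).mp hb)]
      · intro a ha b hb
        rw [List.mem_singleton] at hb
        subst hb
        have ha' := (PySem.Set.mem_ofList t a).mp ha
        rw [hidx a ha', PySem.List.index?_append_singleton_self t _ hw]
        have := pvIdxLt ha'
        simp only [Option.getD_some]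
        exact_mod_cast this

-- the reversed-enumeration insert loop computes the first-occurrence index
lemma pvFirstIdx : ∀ (l : List String) (s : Int) (d : PySem.Dict String Int) (w : String),
    ((PySem.List.enumerate l s).reverse.foldl (fun d p => d.insert p.2 p.1) d).getD w 0 =
    if w ∈ l then s + (((PySem.List.index? l w).getD 0 : Nat) : Int) else d.getD w 0 := by
  intro l
  induction l with
  | nil => intro s d w; simp [PySem.List.enumerate_nil]
  | cons x l ih =>
    intro s d w
    rw [PySem.List.enumerate_cons, List.reverse_cons, List.foldl_append]
    simp only [List.foldl_cons, List.foldl_nil]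
    rw [PySem.Dict.getD_insert]
    by_cases hwx : w = x
    · subst hwx
      rw [if_pos rfl, if_pos (List.mem_cons_self ..), PySem.List.index?_cons_self]
      simp
    · rw [if_neg hwx, ih (s + 1) d w]
      by_cases hwl : w ∈ l
      · rw [if_pos hwl, if_pos (List.mem_cons_of_mem _ hwl)]
        obtain ⟨k, hk⟩ := Option.isSome_iff_exists.mp ((PySem.List.index?_isSome_iff l w).mpr hwl)
        rw [PySem.List.index?_cons_of_ne l (fun h : x = w => hwx h.symm), hk]
        simp only [Option.map_some, Option.getD_some]
        push_cast
        ring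
      · rw [if_neg hwl, if_neg (by simp [hwx, hwl])]

-- ===== VERDICT (by name: the statement is the Claim_ definition above) =====
theorem create_word_mapping_spec : Claim_equal_create_word_mapping := by
  intro words _
  unfold Spec_create_word_mapping create_word_mapping create_word_mapping_alt
  simp only []
  have hfi : ∀ w ∈ words,
      ((PySem.List.enumerate words 0).reverse.foldl
        (fun d p => d.insert p.2 p.1) PySem.Dict.empty).getD w 0
      = (((PySem.List.index? words w).getD 0 : Nat) : Int) := by
    intro w hw
    rw [pvFirstIdx, if_pos hw, zero_add]
  have hpw : (PySem.Set.ofList words).Pairwise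
      (fun a b => ((PySem.List.enumerate words 0).reverse.foldl
          (fun d p => d.insert p.2 p.1) PySem.Dict.empty).getD a 0
        < ((PySem.List.enumerate words 0).reverse.foldl
          (fun d p => d.insert p.2 p.1) PySem.Dict.empty).getD b 0) := by
    refine (pvDedupPairwise words).imp_of_mem ?_
    intro a b ha hb h
    rw [hfi a ((PySem.Set.mem_ofList words a).mp ha), hfi b ((PySem.Set.mem_ofList words b).mp hb)]
    exact h
  have hsort := PySem.List.sorted_eq_of_perm_of_pairwise_lt _ _ _ (List.Perm.refl _) hpw
  rw [hsort]
  have e1 : pvMkA [] = PySem.Dict.empty := rfl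
  have e2 : pvMkB [] = PySem.Dict.empty := rfl
  have h := pvLoopInv words [] List.nodup_nil
  rw [e1, e2] at h
  simp only [List.length_nil, Nat.cast_zero, zero_add, PySem.Set.update_nil_left] at h
  rw [h]
  simp [pvMkA, pvMkB, List.map_map, Function.comp_def]
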